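-- pv_equiv track=rewrite | github.com/eanzenberg/algos | kaitenzushi.py | getMaximumEatenDishCount
-- ===== SOURCE A (Python) =====
-- from typing import List
--
-- def getMaximumEatenDishCount(N: int, D: List[int], K: int) -> int:
--     lookback = {}
--     count = 0
--     for d in D:
--         if not d in lookback or (count - lookback[d]) > K:
--             lookback[d] = count
--             count += 1
--     return count
-- ===== SOURCE B (Python) =====
-- from typing import List
--
-- def getMaximumEatenDishCount(N: int, D: List[int], K: int) -> int:
--     eaten = 0
--     window = []    # values of all eaten dishes in order; window[start:] holds the last up-to-K
--     start = 0      # head pointer of the sliding window inside `window`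
--     present = set()  # the values currently in window[start:]
--     for d in D:
--         if d not in present:
--             eaten += 1
--             window.append(d)
--             present.add(d)
--             if len(window) - start > max(K, 0):
--                 present.discard(window[start])
--                 start += 1
--     return eaten
-- ===== Notes on version B (the rewrite author's own statement) =====
-- stated objective: alternative
-- what changed: Replaces the dict of absolute eaten-counts (compared by subtraction against K) with an explicit sliding window of the last up-to-K eaten dish values, kept as an append-only list with a moving head pointer plus a set for O(1) membership; duplicates are decided by set membership in the window instead of arithmetic on stored counts.
import Mathlib
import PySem

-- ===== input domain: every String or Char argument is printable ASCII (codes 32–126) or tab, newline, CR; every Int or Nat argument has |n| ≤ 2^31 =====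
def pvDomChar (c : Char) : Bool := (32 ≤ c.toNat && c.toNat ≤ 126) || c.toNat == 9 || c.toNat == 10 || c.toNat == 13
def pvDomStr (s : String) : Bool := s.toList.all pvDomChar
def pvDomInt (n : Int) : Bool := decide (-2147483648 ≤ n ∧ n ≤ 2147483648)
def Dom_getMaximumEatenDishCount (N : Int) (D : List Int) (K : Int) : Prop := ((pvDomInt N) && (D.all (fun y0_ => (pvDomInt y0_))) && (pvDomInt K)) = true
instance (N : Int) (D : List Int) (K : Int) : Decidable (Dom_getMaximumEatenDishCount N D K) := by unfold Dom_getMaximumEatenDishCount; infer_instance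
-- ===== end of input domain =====

-- B replaces A's dict of absolute eaten-counts with an explicit sliding window of the last
-- up-to-K eaten dish values (append-only list + moving head pointer + membership set)
-- (objective: alternative decomposition, same result).

-- ===== PORT A =====
-- loop body of A: 'if not d in lookback or (count - lookback[d]) > K: lookback[d] = count; count += 1'
-- (lookback[d] is only reached when d is in lookback, so getD's default is never the value used)
def pvStepA (K : Int) (st : PySem.Dict Int Int × Int) (d : Int) : PySem.Dict Int Int × Int :=
  if ¬ st.1.contains d ∨ st.2 - st.1.getD d 0 > K then (st.1.insert d st.2, st.2 + 1) else st

def getMaximumEatenDishCount (N : Int) (D : List Int) (K : Int) : Int :=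
  (D.foldl (pvStepA K) (PySem.Dict.empty, 0)).2

-- ===== PORT B =====
-- B's loop as structural recursion over the remaining dishes, state = (window, start, present, eaten).
-- 'window[start]' is only evaluated when len(window) - start > max(K,0) ≥ 0, so start is always in
-- range there and List.getD is exact for it.
def pvEatB (K : Int) : List Int → List Int → Nat → PySem.Set Int → Int → Int
  | [], _, _, _, eaten => eaten
  | d :: rest, window, start, present, eaten =>
    if PySem.Set.contains present d then
      pvEatB K rest window start present eaten
    else
      let window' := window ++ [d]
      let present' := PySem.Set.add present d
      if ((window'.length : Int) - start > max K 0) then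
        pvEatB K rest window' (start + 1) (PySem.Set.discard present' (window'.getD start 0)) (eaten + 1)
      else
        pvEatB K rest window' start present' (eaten + 1)

def getMaximumEatenDishCount_alt (N : Int) (D : List Int) (K : Int) : Int :=
  pvEatB K D [] 0 PySem.Set.empty 0

-- ===== PRECONDITION & SPEC =====
def Spec_getMaximumEatenDishCount (N : Int) (D : List Int) (K : Int) (out : Int) : Prop := out = getMaximumEatenDishCount_alt N D K
instance (N : Int) (D : List Int) (K : Int) (out : Int) : Decidable (Spec_getMaximumEatenDishCount N D K out) := by unfold Spec_getMaximumEatenDishCount; infer_instance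

-- ===== CLAIM (what is proved, stated in full; the proofs are below) =====
def Claim_equal_getMaximumEatenDishCount : Prop := ∀ (N : Int) (D : List Int) (K : Int), Dom_getMaximumEatenDishCount N D K → Spec_getMaximumEatenDishCount N D K (getMaximumEatenDishCount N D K)

-- ===== LEMMAS AND PROOFS =====

-- Invariant tying A's state (lookback dict L, count c) to the CONTENT of B's window
-- w = window.drop start (oldest first): counts agree, w has at most max K 0 elements whose
-- dict entries are the consecutive values c - |w| … c - 1, and every dict entry within
-- distance K of c belongs to w.
def pvInv (K : Int) (L : PySem.Dict Int Int) (c : Int) (w : List Int) (e : Int) : Prop :=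
  e = c ∧ 0 ≤ c ∧ (w.length : Int) ≤ max K 0 ∧
  (∀ (i : Nat) (h : i < w.length), L.get? w[i] = some (c - w.length + i)) ∧
  (∀ x v, L.get? x = some v → 0 ≤ v ∧ v < c ∧ (c - v ≤ K → x ∈ w))

lemma pvEatIff (K : Int) (L : PySem.Dict Int Int) (c : Int) (w : List Int) (e : Int) (d : Int)
    (hinv : pvInv K L c w e) :
    ((¬ L.contains d ∨ c - L.getD d 0 > K) ↔ d ∉ w) := by
  obtain ⟨-, -, hlen, hidx, hall⟩ := hinv
  rcases hL : L.get? d with _ | v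
  · constructor
    · intro _ hd
      obtain ⟨i, hi, rfl⟩ := List.mem_iff_getElem.mp hd
      simp [hidx i hi] at hL
    · intro _
      left
      simp [PySem.Dict.contains_eq_isSome_get?, hL]
  · have hc : L.contains d = true := by simp [PySem.Dict.contains_eq_isSome_get?, hL]
    have hg : L.getD d 0 = v := by rw [PySem.Dict.getD_eq_get?_getD, hL]; rfl
    obtain ⟨hv0, hvc, hmem⟩ := hall d v hL
    constructor
    · rintro (h | h)
      · simp [hc] at h
      · rw [hg] at h
        intro hd
        obtain ⟨i, hi, rfl⟩ := List.mem_iff_getElem.mp hd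
        have := hidx i hi
        rw [hL] at this
        have hv : v = c - w.length + i := by simpa using this
        omega
    · intro hd
      right
      rw [hg]
      by_contra hK
      exact hd (hmem (by omega))

-- the window never holds a value twice (its dict entries are pairwise distinct)
lemma pvNodupW (L : PySem.Dict Int Int) (c : Int) (w : List Int)
    (hidx : ∀ (i : Nat) (h : i < w.length), L.get? w[i] = some (c - w.length + i)) :
    w.Nodup := by
  rw [List.nodup_iff_injective_getElem]
  rintro ⟨i, hi⟩ ⟨j, hj⟩ hij
  have h1 := hidx i hi
  have h2 := hidx j hj
  simp only at hij
  rw [hij, h2] at h1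
  have : (i : Int) = j := by
    have := Option.some.inj h1
    omega
  exact Fin.ext (by exact_mod_cast this)

lemma pvMemTail {x : Int} (l : List Int) (hl : l.Nodup) (hne : l ≠ []) :
    x ∈ l.tail ↔ x ∈ l ∧ x ≠ l.headI := by
  rcases l with _ | ⟨a, t⟩
  · exact absurd rfl hne
  · simp only [List.tail_cons, List.headI, List.mem_cons]
    have ha : a ∉ t := (List.nodup_cons.mp hl).1
    constructor
    · intro hx
      exact ⟨Or.inr hx, fun h => ha (h ▸ hx)⟩
    · rintro ⟨hx | hx, hxa⟩
      · exact absurd hx hxa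
      · exact hx

lemma pvInvStep (K : Int) (L : PySem.Dict Int Int) (c : Int) (w : List Int) (e : Int) (d : Int)
    (hinv : pvInv K L c w e) (hd : d ∉ w) :
    pvInv K (L.insert d c) (c + 1)
      (if ((w ++ [d]).length : Int) > max K 0 then (w ++ [d]).tail else w ++ [d]) (e + 1) := by
  obtain ⟨he, hc0, hlen, hidx, hall⟩ := hinv
  by_cases hpop : ((w ++ [d]).length : Int) > max K 0
  · -- pop case: window stays length |w|, head drops out
    simp only [if_pos hpop]
    refine ⟨by omega, by omega, ?_, ?_, ?_⟩
    · simp; simp at hlen ⊢; omega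
    · intro i hi
      have hi' : i < w.length := by simpa using hi
      have hget : (w ++ [d]).tail[i] = (w ++ [d])[i + 1]'(by simp; omega) := by
        simp [List.getElem_tail]
      rw [hget]
      by_cases hlt : i + 1 < w.length
      · rw [List.getElem_append_left hlt]
        have hne : w[i+1] ≠ d := fun h => hd (h ▸ List.getElem_mem hlt)
        rw [PySem.Dict.get?_insert, if_neg hne, hidx (i+1) hlt]
        congr 1
        simp at hi ⊢
        omega
      · have hiw : i + 1 = w.length := by omega
        have : (w ++ [d])[i + 1]'(by simp; omega) = d := by
          rw [List.getElem_append_right (by omega)]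
          simp [hiw]
        rw [this, PySem.Dict.get?_insert, if_pos rfl]
        congr 1
        simp at hi ⊢
        omega
    · intro x v hx
      rw [PySem.Dict.get?_insert] at hx
      by_cases hxd : x = d
      · rw [if_pos hxd] at hx
        have hv : v = c := by simpa using hx.symm
        subst hv
        rw [hxd]
        refine ⟨hc0, by omega, fun hK => ?_⟩
        -- 1 ≤ K, and pop fired, so w is nonempty and d survives in the tail
        have hw : w ≠ [] := by
          intro h
          subst h
          simp at hpop
          omega
        rcases w with _ | ⟨a, w'⟩
        · exact absurd rfl hw
        · simp
      · rw [if_neg hxd] at hx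
        obtain ⟨hv0, hvc, hmem⟩ := hall x v hx
        refine ⟨hv0, by omega, fun hK => ?_⟩
        have hxw : x ∈ w := hmem (by omega)
        obtain ⟨i, hi, rfl⟩ := List.mem_iff_getElem.mp hxw
        have hv : v = c - w.length + i := by
          have := hidx i hi
          rw [hx] at this
          simpa using this
        have hipos : 0 < i := by
          simp at hpop
          omega
        have hmem' : (w ++ [d]).tail[i - 1]'(by simp; omega) = w[i] := by
          rw [List.getElem_tail, List.getElem_append_left (by omega)]
          congr 1
          omega
        exact hmem' ▸ List.getElem_mem _
  · -- no pop: window grows by d at the end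
    simp only [if_neg hpop]
    refine ⟨by omega, by omega, ?_, ?_, ?_⟩
    · simp at hpop ⊢; omega
    · intro i hi
      by_cases hlt : i < w.length
      · rw [List.getElem_append_left hlt]
        have hne : w[i] ≠ d := fun h => hd (h ▸ List.getElem_mem hlt)
        rw [PySem.Dict.get?_insert, if_neg hne, hidx i hlt]
        congr 1
        simp only [List.length_append, List.length_cons, List.length_nil]
        push_cast
        omega
      · have hiw : i = w.length := by simp at hi; omega
        have : (w ++ [d])[i] = d := by
          rw [List.getElem_append_right (by omega)]
          simp [hiw]
        rw [this, PySem.Dict.get?_insert, if_pos rfl]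
        congr 1
        simp
        omega
    · intro x v hx
      rw [PySem.Dict.get?_insert] at hx
      by_cases hxd : x = d
      · rw [if_pos hxd] at hx
        have hv : v = c := by simpa using hx.symm
        subst hv
        rw [hxd]
        exact ⟨hc0, by omega, fun _ => by simp⟩
      · rw [if_neg hxd] at hx
        obtain ⟨hv0, hvc, hmem⟩ := hall x v hx
        exact ⟨hv0, by omega, fun hK => List.mem_append_left _ (hmem (by omega))⟩

lemma pvMain (K : Int) : ∀ (D : List Int) (L : PySem.Dict Int Int) (c : Int)
    (window : List Int) (start : Nat) (present : PySem.Set Int) (e : Int),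
    start ≤ window.length →
    (∀ x, x ∈ present ↔ x ∈ window.drop start) →
    pvInv K L c (window.drop start) e →
    (D.foldl (pvStepA K) (L, c)).2 = pvEatB K D window start present e := by
  intro D
  induction D with
  | nil => intro L c window start present e _ _ hinv; exact hinv.1.symm
  | cons d D ih =>
    intro L c window start present e hstart hpres hinv
    simp only [List.foldl_cons, pvEatB]
    by_cases hd : d ∈ window.drop start
    · have hB : PySem.Set.contains present d = true :=
        (PySem.Set.contains_iff present d).mpr ((hpres d).mpr hd)
      have hA : ¬ (¬ L.contains d ∨ c - L.getD d 0 > K) := by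
        rw [pvEatIff K L c (window.drop start) e d hinv]
        simpa using hd
      rw [show pvStepA K (L, c) d = (L, c) by simp only [pvStepA]; rw [if_neg hA], if_pos hB]
      exact ih L c window start present e hstart hpres hinv
    · have hB : ¬ PySem.Set.contains present d = true := fun h =>
        hd ((hpres d).mp ((PySem.Set.contains_iff present d).mp h))
      have hA : (¬ L.contains d ∨ c - L.getD d 0 > K) := by
        rw [pvEatIff K L c (window.drop start) e d hinv]; exact hd
      rw [show pvStepA K (L, c) d = (L.insert d c, c + 1) by
            simp only [pvStepA]; rw [if_pos hA],
          if_neg hB]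
      -- drop start of the appended window is the old content plus d
      have hdrop : (window ++ [d]).drop start = window.drop start ++ [d] :=
        List.drop_append_of_le_length hstart
      have hlendrop : ((window ++ [d]).length : Int) - start
          = ((window.drop start ++ [d]).length : Int) := by
        simp [List.length_drop]
        omega
      have hstep := pvInvStep K L c (window.drop start) e d hinv hd
      by_cases hpop : (((window ++ [d]).length : Int) - start > max K 0)
      · simp only [if_pos hpop]
        have hpop' : ((window.drop start ++ [d]).length : Int) > max K 0 := by
          rw [← hlendrop]; exact hpop
        rw [if_pos hpop'] at hstep
        -- the popped value window[start] is the head of the current window content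
        have hstart' : start < (window ++ [d]).length := by simp; omega
        have hgetD : (window ++ [d]).getD start 0 = (window.drop start ++ [d]).headI := by
          rw [List.getD_eq_getElem _ _ hstart']
          rw [← hdrop]
          rcases hE : (window ++ [d]).drop start with _ | ⟨a, t⟩
          · have := congrArg List.length hE
            simp [List.length_drop] at this
            omega
          · have : ((window ++ [d]).drop start)[0]'(by rw [hE]; simp) = a := by
              simp [hE]
            rw [List.getElem_drop] at this
            simpa [List.headI] using this
        -- new window content after the pop
        have hdrop' : (window ++ [d]).drop (start + 1) = (window.drop start ++ [d]).tail := by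
          rw [← hdrop, ← List.drop_drop]
          rcases (window ++ [d]).drop start with _ | ⟨a, t⟩ <;> simp
        have hnodup : (window.drop start ++ [d]).Nodup := by
          apply List.Nodup.append
          · exact pvNodupW L c _ hinv.2.2.2.1
          · simp
          · simpa [List.disjoint_singleton] using hd
        apply ih
        · simp; omega
        · intro x
          rw [hdrop', pvMemTail _ hnodup (by simp), hgetD]
          simp only [PySem.Set.mem_discard, PySem.Set.mem_add, hpres x]
          constructor
          · rintro ⟨hx | hx, hne⟩
            · exact ⟨List.mem_append_left _ hx, hne⟩
            · exact ⟨by simp [hx], hne⟩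
          · rintro ⟨hx, hne⟩
            rcases List.mem_append.mp hx with hx | hx
            · exact ⟨Or.inl hx, hne⟩
            · exact ⟨Or.inr (by simpa using hx), hne⟩
        · rw [hdrop']
          exact hstep
      · simp only [if_neg hpop]
        have hpop' : ¬ ((window.drop start ++ [d]).length : Int) > max K 0 := by
          rw [← hlendrop]; exact hpop
        rw [if_neg hpop'] at hstep
        apply ih
        · simp; omega
        · intro x
          rw [hdrop]
          simp only [PySem.Set.mem_add, hpres x]
          constructor
          · rintro (hx | hx)
            · exact List.mem_append_left _ hx
            · simp [hx]
          · intro hx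
            rcases List.mem_append.mp hx with hx | hx
            · exact Or.inl hx
            · exact Or.inr (by simpa using hx)
        · rw [hdrop]
          exact hstep

lemma pvInvInit (K : Int) : pvInv K PySem.Dict.empty 0 [] 0 := by
  refine ⟨rfl, le_refl 0, by simp, by simp, ?_⟩
  intro x v hx
  simp [PySem.Dict.get?_empty] at hx

-- ===== VERDICT (by name: the statement is the Claim_ definition above) =====
theorem getMaximumEatenDishCount_spec : Claim_equal_getMaximumEatenDishCount := by
  intro N D K _
  unfold Spec_getMaximumEatenDishCount getMaximumEatenDishCount getMaximumEatenDishCount_alt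
  exact pvMain K D PySem.Dict.empty 0 [] 0 PySem.Set.empty 0 (by simp)
    (by intro x; simp [PySem.Set.empty]) (pvInvInit K)
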